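-- pv_equiv track=rewrite | github.com/etivakaran/codes | Eshan_Tivakaran_SSMIF Code Question 3.py | sum_ssmif
-- ===== SOURCE A (Python) =====
-- def total(l, start_marker, end_marker, multiple):
--     if start_marker in l and end_marker in l[l.index(start_marker):]:
--         a = sum(l[:l.index(start_marker)])
--         b = sum(l[l.index(start_marker) : (l.index(start_marker) + l[l.index(start_marker):].index(end_marker) + 1)]) * multiple
--         c = sum(l[l.index(start_marker) + l[l.index(start_marker):].index(end_marker) + 1 :])
--         return a + b + c
--     else:
--         return sum(l)
--
-- def sum_ssmif(nested_list):
--     outer_list = []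
--     for inner_list in nested_list:
--         if nested_list.index(inner_list) % 2 == 0:
--             outer_list.append(total(inner_list, 9, 6, 2))
--         else:
--             outer_list.append(total(inner_list, 7, 4, 3))
--     return total(outer_list, 4, 5, 0)
-- ===== SOURCE B (Python) =====
-- def total(l, start_marker, end_marker, multiple):
--     # one left-to-right pass with a state machine instead of repeated .index scans and slicing
--     a = seg = c = plain = 0
--     started = completed = False
--     for x in l:
--         plain += x
--         if completed:
--             c += x
--         elif started:
--             seg += x
--             if x == end_marker:
--                 completed = True
--         elif x == start_marker:
--             started = True
--             seg += x
--             if x == end_marker: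
--                 completed = True
--         else:
--             a += x
--     if started and completed:
--         return a + seg * multiple + c
--     return plain
--
-- def sum_ssmif(nested_list):
--     outer_list = [total(inner, 9, 6, 2) if nested_list.index(inner) % 2 == 0
--                   else total(inner, 7, 4, 3)
--                   for inner in nested_list]
--     return total(outer_list, 4, 5, 0)
-- ===== Notes on version B (the rewrite author's own statement) =====
-- stated objective: alternative
-- what changed: total is rewritten as a single left-to-right state-machine pass (accumulators before/inside/after the marker segment) instead of membership tests plus five .index calls and three slices; the outer loop becomes a comprehension but keeps nested_list.index for duplicate parity.
import Mathlib
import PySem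

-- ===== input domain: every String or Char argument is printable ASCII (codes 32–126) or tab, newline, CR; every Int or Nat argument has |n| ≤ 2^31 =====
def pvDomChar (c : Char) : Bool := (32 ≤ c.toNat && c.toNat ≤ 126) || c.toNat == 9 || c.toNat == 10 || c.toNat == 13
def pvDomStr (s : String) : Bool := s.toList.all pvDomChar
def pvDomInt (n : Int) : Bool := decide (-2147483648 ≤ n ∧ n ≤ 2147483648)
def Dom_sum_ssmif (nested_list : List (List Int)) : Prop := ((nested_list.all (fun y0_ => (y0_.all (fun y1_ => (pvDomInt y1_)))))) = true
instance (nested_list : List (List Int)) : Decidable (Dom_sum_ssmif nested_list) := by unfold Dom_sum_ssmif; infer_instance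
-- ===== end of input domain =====

-- B replaces total's repeated .index/slice passes by a single state-machine pass; return values are identical.

-- ===== PORT A =====
-- total: slicing around the first start_marker and the first end_marker after it
def total_a (l : List Int) (sm em mult : Int) : Int :=
  match PySem.List.index? l sm with
  | some i =>
    match PySem.List.index? (PySem.List.slice l (some (i : Int)) none) em with
    | some j =>
      let a := (PySem.List.slice l none (some (i : Int))).sum
      let b := (PySem.List.slice l (some (i : Int)) (some ((i : Int) + (j : Int) + 1))).sum * mult
      let c := (PySem.List.slice l (some ((i : Int) + (j : Int) + 1)) none).sum
      a + b + c
    | none => l.sum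
  | none => l.sum

def sum_ssmif (nested_list : List (List Int)) : Int :=
  let outer_list := nested_list.foldl (fun acc inner =>
    if ((PySem.List.index? nested_list inner).getD 0) % 2 = 0 then
      acc ++ [total_a inner 9 6 2]
    else
      acc ++ [total_a inner 7 4 3]) []
  total_a outer_list 4 5 0

-- ===== PORT B =====
-- loop body of B's total: state (a, seg, c, plain, started, completed)
def stepB (sm em : Int) : (Int × Int × Int × Int × Bool × Bool) → Int → (Int × Int × Int × Int × Bool × Bool)
  | (a, seg, c, p, started, completed), x =>
    let p' := p + x
    if completed then (a, seg, c + x, p', started, completed)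
    else if started then (a, seg + x, c, p', started, x == em)
    else if x == sm then (a, seg + x, c, p', true, x == em)
    else (a + x, seg, c, p', started, completed)

def total_b (l : List Int) (sm em mult : Int) : Int :=
  match l.foldl (stepB sm em) (0, 0, 0, 0, false, false) with
  | (a, seg, c, p, started, completed) =>
    if started && completed then a + seg * mult + c else p

def sum_ssmif_alt (nested_list : List (List Int)) : Int :=
  let outer_list := nested_list.map (fun inner =>
    if ((PySem.List.index? nested_list inner).getD 0) % 2 = 0 then
      total_b inner 9 6 2
    else
      total_b inner 7 4 3)
  total_b outer_list 4 5 0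

-- ===== PRECONDITION & SPEC =====
def Spec_sum_ssmif (nested_list : List (List Int)) (out : Int) : Prop := out = sum_ssmif_alt nested_list
instance (nested_list : List (List Int)) (out : Int) : Decidable (Spec_sum_ssmif nested_list out) := by unfold Spec_sum_ssmif; infer_instance

-- ===== CLAIM (what is proved, stated in full; the proofs are below) =====
def Claim_equal_sum_ssmif : Prop := ∀ (nested_list : List (List Int)), Dom_sum_ssmif nested_list → Spec_sum_ssmif nested_list (sum_ssmif nested_list)

-- ===== LEMMAS AND PROOFS =====

theorem stepB_done (sm em a seg c p x : Int) (st : Bool) :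
    stepB sm em (a, seg, c, p, st, true) x = (a, seg, c + x, p + x, st, true) := by
  simp [stepB]

theorem stepB_started (sm em a seg c p x : Int) :
    stepB sm em (a, seg, c, p, true, false) x = (a, seg + x, c, p + x, true, x == em) := by
  simp [stepB]

theorem stepB_enter (sm em a seg c p x : Int) (hx : x = sm) :
    stepB sm em (a, seg, c, p, false, false) x = (a, seg + x, c, p + x, true, x == em) := by
  simp [stepB, hx]

theorem stepB_idle (sm em a seg c p x : Int) (hx : x ≠ sm) :
    stepB sm em (a, seg, c, p, false, false) x = (a + x, seg, c, p + x, false, false) := by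
  simp [stepB, hx]

theorem phase2 (sm em : Int) (l : List Int) (a seg c p : Int) (st : Bool) :
    l.foldl (stepB sm em) (a, seg, c, p, st, true) = (a, seg, c + l.sum, p + l.sum, st, true) := by
  induction l generalizing c p with
  | nil => simp
  | cons x t ih =>
    rw [List.foldl_cons, stepB_done, ih, List.sum_cons]
    simp only [Prod.mk.injEq, and_true, true_and]
    omega

theorem phase1_none (sm em : Int) (l : List Int) (a seg c p : Int) (h : em ∉ l) :
    l.foldl (stepB sm em) (a, seg, c, p, true, false) = (a, seg + l.sum, c, p + l.sum, true, false) := by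
  induction l generalizing seg p with
  | nil => simp
  | cons x t ih =>
    simp only [List.mem_cons, not_or] at h
    have hx : (x == em) = false := by simp [Ne.symm h.1]
    rw [List.foldl_cons, stepB_started, hx, ih _ _ h.2, List.sum_cons]
    simp only [Prod.mk.injEq, and_true, true_and]
    omega

theorem phase1_some (sm em : Int) (u v : List Int) (a seg c p : Int) (h : em ∉ u) :
    (u ++ em :: v).foldl (stepB sm em) (a, seg, c, p, true, false)
      = (a, seg + u.sum + em, c + v.sum, p + u.sum + em + v.sum, true, true) := by
  induction u generalizing seg p with
  | nil =>
    rw [List.nil_append, List.foldl_cons, stepB_started, beq_self_eq_true, phase2]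
    simp only [List.sum_nil, Prod.mk.injEq, and_true, true_and]
    omega
  | cons x t ih =>
    simp only [List.mem_cons, not_or] at h
    have hx : (x == em) = false := by simp [Ne.symm h.1]
    rw [List.cons_append, List.foldl_cons, stepB_started, hx, ih _ _ h.2, List.sum_cons]
    simp only [Prod.mk.injEq, and_true, true_and]
    omega

theorem phase0_none (sm em : Int) (l : List Int) (a seg c p : Int) (h : sm ∉ l) :
    l.foldl (stepB sm em) (a, seg, c, p, false, false) = (a + l.sum, seg, c, p + l.sum, false, false) := by
  induction l generalizing a p with
  | nil => simp
  | cons x t ih =>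
    simp only [List.mem_cons, not_or] at h
    rw [List.foldl_cons, stepB_idle _ _ _ _ _ _ _ (Ne.symm h.1), ih _ _ h.2, List.sum_cons]
    simp only [Prod.mk.injEq, and_true, true_and]
    omega

theorem phase0_enter (sm em : Int) (u v : List Int) (a seg c p : Int) (h : sm ∉ u) :
    (u ++ sm :: v).foldl (stepB sm em) (a, seg, c, p, false, false)
      = v.foldl (stepB sm em) (a + u.sum, seg + sm, c, p + u.sum + sm, true, sm == em) := by
  induction u generalizing a p with
  | nil =>
    rw [List.nil_append, List.foldl_cons, stepB_enter _ _ _ _ _ _ _ rfl]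
    simp only [List.sum_nil]
    congr 1
    simp only [Prod.mk.injEq, and_true, true_and]
    omega
  | cons x t ih =>
    simp only [List.mem_cons, not_or] at h
    rw [List.cons_append, List.foldl_cons, stepB_idle _ _ _ _ _ _ _ (Ne.symm h.1), ih _ _ h.2,
      List.sum_cons]
    congr 1
    simp only [Prod.mk.injEq, and_true, true_and]
    omega

theorem total_eq (l : List Int) (sm em mult : Int) : total_a l sm em mult = total_b l sm em mult := by
  unfold total_a total_b
  cases h : PySem.List.index? l sm with
  | none =>
    have hmem : sm ∉ l := (PySem.List.index?_eq_none_iff _ _).mp h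
    rw [phase0_none _ _ _ _ _ _ _ hmem]
    simp
  | some i =>
    obtain ⟨u, v, rfl, hlen, hnm⟩ := (PySem.List.index?_eq_some_iff _ _ _).mp h
    have hdrop : PySem.List.slice (u ++ sm :: v) (some (i : Int)) none = sm :: v := by
      rw [PySem.List.slice_from_natCast, ← hlen, List.drop_left]
    dsimp only
    rw [hdrop]
    cases h2 : PySem.List.index? (sm :: v) em with
    | none =>
      have hem : em ∉ sm :: v := (PySem.List.index?_eq_none_iff _ _).mp h2
      have hne : (sm == em) = false := by
        simp only [List.mem_cons, not_or] at hem
        exact beq_eq_false_iff_ne.mpr (Ne.symm hem.1)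
      have hv : em ∉ v := by
        simp only [List.mem_cons, not_or] at hem
        exact hem.2
      rw [phase0_enter _ _ _ _ _ _ _ _ hnm, hne, phase1_none _ _ _ _ _ _ _ hv]
      simp [List.sum_append]
      ring
    | some j =>
      obtain ⟨pre, suf, heq, hplen, hpre⟩ := (PySem.List.index?_eq_some_iff _ _ _).mp h2
      have htake : PySem.List.slice (u ++ sm :: v) none (some (i : Int)) = u := by
        rw [PySem.List.slice_to_natCast, ← hlen, List.take_left]
      have hcast : (i : Int) + (j : Int) + 1 = ((i + (j + 1) : Nat) : Int) := by push_cast; ring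
      have hmid : PySem.List.slice (u ++ sm :: v) (some (i : Int)) (some ((i : Int) + (j : Int) + 1))
          = (sm :: v).take (j + 1) := by
        rw [hcast, PySem.List.slice_natCast, ← hlen, List.drop_left]
        congr 1
        omega
      have hend : PySem.List.slice (u ++ sm :: v) (some ((i : Int) + (j : Int) + 1)) none
          = (sm :: v).drop (j + 1) := by
        rw [hcast, PySem.List.slice_from_natCast, ← hlen, List.drop_append]
        have h1 : List.drop (u.length + (j + 1)) u = [] := List.drop_eq_nil_of_le (by omega)
        rw [h1, List.nil_append]
        congr 1
        omega
      dsimp only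
      rw [htake, hmid, hend]
      cases pre with
      | nil =>
        have hj : j = 0 := by simpa using hplen.symm
        have hse : sm = em := (List.cons.injEq _ _ _ _ ▸ heq).1
        have hvs : v = suf := (List.cons.injEq _ _ _ _ ▸ heq).2
        subst hj
        have hbt : (sm == em) = true := by simp [hse]
        rw [phase0_enter _ _ _ _ _ _ _ _ hnm, hbt, phase2]
        simp [hvs]
      | cons y w =>
        have hy : sm = y := (List.cons.injEq _ _ _ _ ▸ heq).1
        have hveq : v = w ++ em :: suf := (List.cons.injEq _ _ _ _ ▸ heq).2
        have hjw : j = w.length + 1 := by simp [← hplen]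
        simp only [List.mem_cons, not_or] at hpre
        have hne : (sm == em) = false := beq_eq_false_iff_ne.mpr (by rw [hy]; exact Ne.symm hpre.1)
        have hwe : em ∉ w := hpre.2
        rw [phase0_enter _ _ _ _ _ _ _ _ hnm, hne]
        subst hveq
        rw [phase1_some _ _ _ _ _ _ _ _ hwe]
        have hts : (sm :: (w ++ em :: suf)).take (j + 1) = sm :: (w ++ [em]) := by
          subst hjw
          simp [List.take_append]
        have hds : (sm :: (w ++ em :: suf)).drop (j + 1) = suf := by
          subst hjw
          simp [List.drop_append]
        rw [hts, hds]
        simp [List.sum_append]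
        exact Or.inl (by ring)

theorem foldl_push {α β : Type} (f : α → β) (l : List α) (acc : List β) :
    l.foldl (fun a x => a ++ [f x]) acc = acc ++ l.map f := by
  induction l generalizing acc with
  | nil => simp
  | cons x t ih => simp [ih]

-- ===== VERDICT (by name: the statement is the Claim_ definition above) =====
theorem sum_ssmif_spec : Claim_equal_sum_ssmif := by
  intro nl _
  unfold Spec_sum_ssmif sum_ssmif sum_ssmif_alt
  have hfold : nl.foldl (fun acc inner =>
      if ((PySem.List.index? nl inner).getD 0) % 2 = 0 then
        acc ++ [total_a inner 9 6 2]
      else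
        acc ++ [total_a inner 7 4 3]) []
      = nl.map (fun inner =>
          if ((PySem.List.index? nl inner).getD 0) % 2 = 0 then
            total_b inner 9 6 2
          else
            total_b inner 7 4 3) := by
    have : (fun (acc : List Int) inner =>
        if ((PySem.List.index? nl inner).getD 0) % 2 = 0 then
          acc ++ [total_a inner 9 6 2]
        else
          acc ++ [total_a inner 7 4 3])
        = fun acc inner => acc ++ [if ((PySem.List.index? nl inner).getD 0) % 2 = 0 then
            total_b inner 9 6 2 else total_b inner 7 4 3] := by
      funext acc inner
      split <;> rw [total_eq]
    rw [this, foldl_push]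
    simp
  rw [hfold, total_eq]
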